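-- pv_equiv track=rewrite | github.com/goodsnek/die-freak | DieFreak.py | tick_roll
-- ===== SOURCE A (Python) =====
-- def tick_roll(roll, facets, pos=0):
--     # Special case - total rollover
--     dice = len(roll)
--     if pos >= dice:
--         for i in range(dice):
--             roll[i] = 1
--         return roll
--
--     # Standard case - tick die by 1
--     roll[pos] += 1
--
--     # Single digit rollover
--     if roll[pos] > facets:
--         roll[pos] = 1
--         return tick_roll(roll, facets, pos+1)
--     return roll
-- ===== SOURCE B (Python) =====
-- def tick_roll(roll, facets, pos=0):
--     dice = len(roll)
--     while pos < dice:
--         roll[pos] += 1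
--         if roll[pos] > facets:
--             roll[pos] = 1
--             pos += 1
--         else:
--             return roll
--     # total rollover: carry walked off the end (or pos >= dice on entry)
--     for i in range(dice):
--         roll[i] = 1
--     return roll
-- ===== Notes on version B (the rewrite author's own statement) =====
-- stated objective: idiomatic
-- what changed: Replaces A's tail recursion (re-entering the function for each carry, re-checking the total-rollover special case every call) with a single while loop that walks pos forward, falling through to one fill loop on full rollover; Pre_ excludes pos < -len(roll), where both A and B raise IndexError.
import Mathlib
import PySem

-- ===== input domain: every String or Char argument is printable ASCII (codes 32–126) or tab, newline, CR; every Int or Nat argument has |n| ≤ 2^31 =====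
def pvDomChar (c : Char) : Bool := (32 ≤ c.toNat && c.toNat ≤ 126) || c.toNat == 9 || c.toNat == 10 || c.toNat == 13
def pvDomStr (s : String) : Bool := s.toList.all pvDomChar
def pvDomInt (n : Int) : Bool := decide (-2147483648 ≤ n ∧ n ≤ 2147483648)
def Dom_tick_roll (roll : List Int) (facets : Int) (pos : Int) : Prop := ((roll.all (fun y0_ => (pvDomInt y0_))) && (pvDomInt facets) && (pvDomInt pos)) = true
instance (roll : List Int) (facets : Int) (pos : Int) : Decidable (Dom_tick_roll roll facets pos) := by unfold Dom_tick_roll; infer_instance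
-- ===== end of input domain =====

-- B replaces A's tail recursion with a single while loop plus a fall-through fill loop (same return value, same in-place mutation in Python).

-- ===== PORT A =====
-- termination helper for the port's recursion (the carry step preserves the list's length)
theorem pv_len_pySetD {α : Type} (xs : List α) (i : Int) (v : α) :
    (PySem.List.pySetD xs i v).length = xs.length := PySem.List.length_pySetD xs i v

-- literal port of A; where Python raises IndexError (pos < -len) the port returns [] (excluded by Pre_)
def tick_roll (roll : List Int) (facets : Int) (pos : Int) : List Int :=
  let dice : Int := roll.length
  if pos ≥ dice then
    (PySem.List.pyRange 0 dice 1).foldl (fun r i => PySem.List.pySetD r i 1) roll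
  else
    match PySem.List.pyGet? roll pos with
    | none => []  -- Python: IndexError
    | some x =>
      let r1 := PySem.List.pySetD roll pos (x + 1)
      if x + 1 > facets then
        tick_roll (PySem.List.pySetD r1 pos 1) facets (pos + 1)
      else r1
  termination_by (roll.length - pos).toNat
  decreasing_by
    simp only [pv_len_pySetD]
    omega

-- ===== PORT B =====
-- the while loop: some r = early 'return roll', none = loop condition failed (fall through to the fill loop)
def tickLoop (facets : Int) (roll : List Int) (pos : Int) : Option (List Int) :=
  if pos < (roll.length : Int) then
    match PySem.List.pyGet? roll pos with
    | none => none  -- Python: IndexError (excluded by Pre_)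
    | some x =>
      let r1 := PySem.List.pySetD roll pos (x + 1)
      if x + 1 > facets then
        tickLoop facets (PySem.List.pySetD r1 pos 1) (pos + 1)
      else some r1
  else none
  termination_by (roll.length - pos).toNat
  decreasing_by
    simp only [pv_len_pySetD]
    omega

def tick_roll_alt (roll : List Int) (facets : Int) (pos : Int) : List Int :=
  match tickLoop facets roll pos with
  | some r => r
  | none =>
    (PySem.List.pyRange 0 (roll.length : Int) 1).foldl (fun r i => PySem.List.pySetD r i 1) roll

-- ===== PRECONDITION & SPEC =====
-- Pre_ excludes exactly the inputs where the Python A raises IndexError (pos below -len(roll): negative index beyond wraparound); A returns on all other inputs.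
def Pre_tick_roll (roll : List Int) (facets : Int) (pos : Int) : Prop :=
  -(roll.length : Int) ≤ pos
instance (roll : List Int) (facets : Int) (pos : Int) : Decidable (Pre_tick_roll roll facets pos) := by unfold Pre_tick_roll; infer_instance
def pvWitness_tick_roll : List Int × Int × Int := ([2, 6, 1], 6, 0)

def Spec_tick_roll (roll : List Int) (facets : Int) (pos : Int) (out : List Int) : Prop := out = tick_roll_alt roll facets pos
instance (roll : List Int) (facets : Int) (pos : Int) (out : List Int) : Decidable (Spec_tick_roll roll facets pos out) := by unfold Spec_tick_roll; infer_instance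

-- ===== CLAIM (what is proved, stated in full; the proofs are below) =====
def Claim_equal_tick_roll : Prop := ∀ (roll : List Int) (facets : Int) (pos : Int), Dom_tick_roll roll facets pos → Pre_tick_roll roll facets pos → Spec_tick_roll roll facets pos (tick_roll roll facets pos)

-- ===== LEMMAS AND PROOFS =====

-- the fill loop 'for i in range(len): r[i] = 1' turns the not-yet-visited suffix into all ones
theorem pv_fill_replicate (d : Nat) : ∀ (k : Nat) (r : List Int), r.length = k + d →
    (PySem.List.pyRange (k : Int) ((k + d : Nat) : Int) 1).foldl (fun r i => PySem.List.pySetD r i 1) r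
      = r.take k ++ List.replicate d 1 := by
  induction d with
  | zero =>
    intro k r hr
    rw [PySem.List.pyRange_one_eq_nil (by omega)]
    have ht : r.take k = r := List.take_of_length_le (by omega)
    simp [ht]
  | succ d ih =>
    intro k r hr
    rw [PySem.List.pyRange_one_cons (by exact_mod_cast (by omega : k < k + (d+1)))]
    simp only [List.foldl_cons, PySem.List.pySetD_natCast]
    have hklen : k < r.length := by omega
    have hcast : ((k + (d + 1) : Nat) : Int) = ((k + 1) + d : Nat) := by push_cast; ring
    have hstep : ((k : Int) + 1) = (((k + 1 : Nat)) : Int) := by push_cast; ring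
    rw [hcast, hstep, ih (k + 1) (r.set k 1) (by simp; omega)]
    rw [List.set_eq_take_cons_drop 1 hklen]
    have hlt : (r.take k).length = k := List.length_take_of_le (le_of_lt hklen)
    rw [List.take_append, hlt]
    have h1 : (r.take k).take (k+1) = r.take k := List.take_of_length_le (by omega)
    simp [h1, List.replicate_succ]

-- the whole array filled: the fill loop starting at 0 yields all ones
theorem pv_fill_all (r : List Int) :
    (PySem.List.pyRange 0 (r.length : Int) 1).foldl (fun r i => PySem.List.pySetD r i 1) r
      = List.replicate r.length 1 := by
  have h := pv_fill_replicate r.length 0 r (by omega)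
  simpa using h

-- main loop lemma: A's recursion equals B's while loop (with B's fall-through fill written as replicate)
theorem pv_key (n : Nat) : ∀ (roll : List Int) (facets pos : Int),
    (roll.length - pos).toNat ≤ n → -(roll.length : Int) ≤ pos →
    tick_roll roll facets pos
      = (match tickLoop facets roll pos with
         | some r => r
         | none => List.replicate roll.length 1) := by
  induction n with
  | zero =>
    intro roll facets pos hn hpre
    have hge : pos ≥ (roll.length : Int) := by omega
    rw [tick_roll, tickLoop]
    simp only [if_pos hge, if_neg (by omega : ¬ pos < (roll.length : Int))]
    rw [pv_fill_all roll]
  | succ n ih =>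
    intro roll facets pos hn hpre
    by_cases hlt : pos < (roll.length : Int)
    · have hget : ∃ x, PySem.List.pyGet? roll pos = some x := by
        cases hx : PySem.List.pyGet? roll pos with
        | none =>
          have hni := (PySem.List.pyGet?_eq_none_iff (xs := roll) (i := pos)).mp hx
          exact absurd hni (by simp only [not_not, PySem.Raise.InRange]; omega)
        | some x => exact ⟨x, rfl⟩
      obtain ⟨x, hx⟩ := hget
      rw [tick_roll, tickLoop]
      simp only [if_neg (by omega : ¬ pos ≥ (roll.length : Int)), if_pos hlt, hx]
      by_cases hc : x + 1 > facets
      · simp only [if_pos hc]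
        have hlen : (PySem.List.pySetD (PySem.List.pySetD roll pos (x + 1)) pos 1).length
            = roll.length := by simp only [pv_len_pySetD]
        rw [ih _ facets (pos + 1) (by rw [hlen]; omega) (by rw [hlen]; omega), hlen]
      · simp only [if_neg hc]
    · have hge : pos ≥ (roll.length : Int) := by omega
      rw [tick_roll, tickLoop]
      simp only [if_pos hge, if_neg hlt]
      rw [pv_fill_all roll]

theorem tick_roll_spec : Claim_equal_tick_roll := by
  intro roll facets pos _hdom hpre
  unfold Spec_tick_roll tick_roll_alt
  rw [pv_key (roll.length - pos).toNat roll facets pos le_rfl hpre]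
  cases h : tickLoop facets roll pos with
  | some r => rfl
  | none => rw [pv_fill_all roll]
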